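-- pv_equiv track=rewrite | github.com/spectrumwebco/agent_runtime | backend/apps/python_agent/veigar/security/security_analyzer.py | _determine_severity_level
-- ===== SOURCE A (Python) =====
-- from typing import Any, Dict, List, Optional, Union
--
-- def _determine_severity_level(
--
--     static_findings: List[Dict[str, Any]],
--     vulnerabilities: List[Dict[str, Any]],
--     compliance_issues: List[Dict[str, Any]]
-- ) -> str:
--     """Determine the overall severity level based on all findings."""
--     severity_counts = {
--         "critical": 0,
--         "high": 0,
--         "medium": 0,
--         "low": 0,
--         "info": 0
--     }
--
--     for finding in static_findings:
--         severity = finding.get("severity", "").lower()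
--         if severity in severity_counts:
--             severity_counts[severity] += 1
--
--     for vuln in vulnerabilities:
--         severity = vuln.get("severity", "").lower()
--         if severity in severity_counts:
--             severity_counts[severity] += 1
--
--     for issue in compliance_issues:
--         severity = issue.get("severity", "").lower()
--         if severity in severity_counts:
--             severity_counts[severity] += 1
--
--     if severity_counts["critical"] > 0:
--         return "critical"
--     elif severity_counts["high"] > 0:
--         return "high"
--     elif severity_counts["medium"] > 0:
--         return "medium"
--     elif severity_counts["low"] > 0:
--         return "low"
--     else:
--         return "none"
-- ===== SOURCE B (Python) =====
-- from typing import Any, Dict, List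
--
--
-- def _determine_severity_level(
--     static_findings: List[Dict[str, Any]],
--     vulnerabilities: List[Dict[str, Any]],
--     compliance_issues: List[Dict[str, Any]],
-- ) -> str:
--     """Determine the overall severity level based on all findings."""
--     priority = ["critical", "high", "medium", "low"]
--     best = 4
--     for finding in static_findings + vulnerabilities + compliance_issues:
--         severity = finding.get("severity", "").lower()
--         if severity in priority:
--             best = min(best, priority.index(severity))
--     return priority[best] if best < 4 else "none"
-- ===== Notes on version B (the rewrite author's own statement) =====
-- stated objective: simpler
-- what changed: Replaces the five-key count dictionary built over three separate loops plus a five-way count>0 branch by a single pass over the concatenated findings that tracks only the best (smallest) priority index, returning priority[best] or 'none'.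
import Mathlib
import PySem

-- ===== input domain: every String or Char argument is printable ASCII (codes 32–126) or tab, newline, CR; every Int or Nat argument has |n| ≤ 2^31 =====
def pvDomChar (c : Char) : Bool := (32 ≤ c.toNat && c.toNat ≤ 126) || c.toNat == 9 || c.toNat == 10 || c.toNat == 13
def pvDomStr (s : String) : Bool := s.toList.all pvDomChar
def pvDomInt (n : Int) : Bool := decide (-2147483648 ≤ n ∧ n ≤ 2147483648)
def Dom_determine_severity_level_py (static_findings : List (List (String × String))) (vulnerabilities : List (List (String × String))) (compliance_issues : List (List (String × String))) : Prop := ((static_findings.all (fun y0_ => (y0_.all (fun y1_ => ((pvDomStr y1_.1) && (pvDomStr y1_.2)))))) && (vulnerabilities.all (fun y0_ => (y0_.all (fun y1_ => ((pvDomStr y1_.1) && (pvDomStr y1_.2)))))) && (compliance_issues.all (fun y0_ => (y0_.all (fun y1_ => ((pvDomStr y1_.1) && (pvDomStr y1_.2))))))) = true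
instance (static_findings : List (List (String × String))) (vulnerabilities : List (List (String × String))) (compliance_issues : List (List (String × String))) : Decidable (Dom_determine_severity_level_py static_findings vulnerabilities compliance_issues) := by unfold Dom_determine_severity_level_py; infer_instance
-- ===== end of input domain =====

-- B replaces A's five-key severity-count dictionary and count-then-branch chain by a
-- single best-rank tracking pass over the concatenated findings (objective: simpler).

-- ===== PORT A =====
-- severity = finding.get("severity", "").lower()
def pvSevA (f : List (String × String)) : String :=
  PySem.Str.lower ((PySem.Dict.mk f).getD "severity" "")

-- body of each of A's three loops: if severity in severity_counts: severity_counts[severity] += 1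
def pvStepA (d : PySem.Dict String Int) (f : List (String × String)) : PySem.Dict String Int :=
  let severity := pvSevA f
  if d.contains severity then d.modify severity 0 (· + 1) else d

def determine_severity_level_py (static_findings : List (List (String × String))) (vulnerabilities : List (List (String × String))) (compliance_issues : List (List (String × String))) : String :=
  let severity_counts : PySem.Dict String Int :=
    PySem.Dict.ofList [("critical", 0), ("high", 0), ("medium", 0), ("low", 0), ("info", 0)]
  let d1 := static_findings.foldl pvStepA severity_counts
  let d2 := vulnerabilities.foldl pvStepA d1
  let d3 := compliance_issues.foldl pvStepA d2
  if d3.getD "critical" 0 > 0 then "critical"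
  else if d3.getD "high" 0 > 0 then "high"
  else if d3.getD "medium" 0 > 0 then "medium"
  else if d3.getD "low" 0 > 0 then "low"
  else "none"

-- ===== PORT B =====
def pvPriority : List String := ["critical", "high", "medium", "low"]

-- loop body: if severity in priority: best = min(best, priority.index(severity))
def pvStepB (best : Nat) (f : List (String × String)) : Nat :=
  let severity := PySem.Str.lower ((PySem.Dict.mk f).getD "severity" "")
  match PySem.List.index? pvPriority severity with
  | some i => min best i
  | none => best

def determine_severity_level_py_alt (static_findings : List (List (String × String))) (vulnerabilities : List (List (String × String))) (compliance_issues : List (List (String × String))) : String :=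
  let best := (static_findings ++ vulnerabilities ++ compliance_issues).foldl pvStepB 4
  if best < 4 then pvPriority.getD best "none" else "none"

-- ===== PRECONDITION & SPEC =====
def Spec_determine_severity_level_py (static_findings : List (List (String × String))) (vulnerabilities : List (List (String × String))) (compliance_issues : List (List (String × String))) (out : String) : Prop := out = determine_severity_level_py_alt static_findings vulnerabilities compliance_issues
instance (static_findings : List (List (String × String))) (vulnerabilities : List (List (String × String))) (compliance_issues : List (List (String × String))) (out : String) : Decidable (Spec_determine_severity_level_py static_findings vulnerabilities compliance_issues out) := by unfold Spec_determine_severity_level_py; infer_instance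

-- ===== CLAIM (what is proved, stated in full; the proofs are below) =====
def Claim_equal_determine_severity_level_py : Prop := ∀ (static_findings : List (List (String × String))) (vulnerabilities : List (List (String × String))) (compliance_issues : List (List (String × String))), Dom_determine_severity_level_py static_findings vulnerabilities compliance_issues → Spec_determine_severity_level_py static_findings vulnerabilities compliance_issues (determine_severity_level_py static_findings vulnerabilities compliance_issues)

-- ===== LEMMAS AND PROOFS =====

-- rank of a finding in B's priority order (4 = not a counted severity)
def pvRank (f : List (String × String)) : Nat :=
  match PySem.List.index? pvPriority (pvSevA f) with
  | some i => i
  | none => 4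

lemma pvRank_eq (f : List (String × String)) :
    pvRank f =
      if pvSevA f = "critical" then 0
      else if pvSevA f = "high" then 1
      else if pvSevA f = "medium" then 2
      else if pvSevA f = "low" then 3
      else 4 := by
  unfold pvRank pvPriority
  split_ifs with h1 h2 h3 h4
  · rw [h1, PySem.List.index?_cons_self]
  · rw [PySem.List.index?_cons_of_ne _ (fun h => h1 h.symm), h2,
      PySem.List.index?_cons_self]; rfl
  · rw [PySem.List.index?_cons_of_ne _ (fun h => h1 h.symm),
      PySem.List.index?_cons_of_ne _ (fun h => h2 h.symm), h3,
      PySem.List.index?_cons_self]; rfl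
  · rw [PySem.List.index?_cons_of_ne _ (fun h => h1 h.symm),
      PySem.List.index?_cons_of_ne _ (fun h => h2 h.symm),
      PySem.List.index?_cons_of_ne _ (fun h => h3 h.symm), h4,
      PySem.List.index?_cons_self]; rfl
  · rw [PySem.List.index?_cons_of_ne _ (fun h => h1 h.symm),
      PySem.List.index?_cons_of_ne _ (fun h => h2 h.symm),
      PySem.List.index?_cons_of_ne _ (fun h => h3 h.symm),
      PySem.List.index?_cons_of_ne _ (fun h => h4 h.symm)]
    rfl

lemma pvStepB_eq (b : Nat) (f : List (String × String)) :
    pvStepB b f = match PySem.List.index? pvPriority (pvSevA f) with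
      | some i => min b i
      | none => b := rfl

lemma pvRank_le_four (f : List (String × String)) : pvRank f ≤ 4 := by
  rw [pvRank_eq]; split_ifs <;> omega

lemma pvStepB_le (b : Nat) (f : List (String × String)) : pvStepB b f ≤ b := by
  rw [pvStepB_eq]
  cases h : PySem.List.index? pvPriority (pvSevA f)
  · exact le_refl b
  · exact Nat.min_le_left b _

lemma pvStepB_eq_min (b : Nat) (f : List (String × String)) (hb : b ≤ 4) :
    pvStepB b f = min b (pvRank f) := by
  rw [pvStepB_eq]
  unfold pvRank
  cases h : PySem.List.index? pvPriority (pvSevA f)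
  · show b = min b 4
    omega
  · rfl

lemma pvStepB_four (f : List (String × String)) : pvStepB 4 f = pvRank f := by
  rw [pvStepB_eq_min 4 f (le_refl 4)]
  have := pvRank_le_four f
  omega

lemma pvFoldB_le : ∀ (L : List (List (String × String))) (b : Nat), L.foldl pvStepB b ≤ b := by
  intro L
  induction L with
  | nil => intro b; simp
  | cons f L ih =>
    intro b
    calc (f :: L).foldl pvStepB b = L.foldl pvStepB (pvStepB b f) := rfl
      _ ≤ pvStepB b f := ih _
      _ ≤ b := pvStepB_le b f

lemma pvFoldB_min : ∀ (L : List (List (String × String))) (b : Nat), b ≤ 4 →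
    L.foldl pvStepB b = min b (L.foldl pvStepB 4) := by
  intro L
  induction L with
  | nil => intro b hb; simp; omega
  | cons f L ih =>
    intro b hb
    have hML : L.foldl pvStepB 4 ≤ 4 := pvFoldB_le L 4
    have e1 : (f :: L).foldl pvStepB b = min (pvStepB b f) (L.foldl pvStepB 4) :=
      ih _ (le_trans (pvStepB_le b f) hb)
    have e2 : (f :: L).foldl pvStepB 4 = min (pvStepB 4 f) (L.foldl pvStepB 4) :=
      ih _ (pvStepB_le 4 f)
    rw [e1, e2, pvStepB_eq_min b f hb, pvStepB_eq_min 4 f (le_refl 4)]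
    have := pvRank_le_four f
    omega

lemma pvFoldB_le_iff (r : Nat) : ∀ (L : List (List (String × String))),
    L.foldl pvStepB 4 ≤ r ↔ (4 ≤ r ∨ ∃ f ∈ L, pvRank f ≤ r) := by
  intro L
  induction L with
  | nil => simp
  | cons f L ih =>
    have e : (f :: L).foldl pvStepB 4 = min (pvRank f) (L.foldl pvStepB 4) := by
      show L.foldl pvStepB (pvStepB 4 f) = _
      rw [pvFoldB_min L _ (pvStepB_le 4 f), pvStepB_four]
    have hML : L.foldl pvStepB 4 ≤ 4 := pvFoldB_le L 4
    rw [e]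
    simp only [List.mem_cons]
    constructor
    · intro h
      rcases min_le_iff.mp h with h2 | h2
      · exact Or.inr ⟨f, Or.inl rfl, h2⟩
      · rcases ih.mp h2 with h3 | ⟨g, hg, hr⟩
        · exact Or.inl h3
        · exact Or.inr ⟨g, Or.inr hg, hr⟩
    · intro h
      rcases h with h4 | ⟨g, hg | hg, hr⟩
      · have h5 : min (pvRank f) (L.foldl pvStepB 4) ≤ 4 :=
          le_trans (Nat.min_le_right _ _) hML
        omega
      · subst hg; exact le_trans (Nat.min_le_left _ _) hr
      · exact le_trans (Nat.min_le_right _ _) (ih.mpr (Or.inr ⟨g, hg, hr⟩))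

lemma pvStepA_eq (d : PySem.Dict String Int) (f : List (String × String)) :
    pvStepA d f = if d.contains (pvSevA f) then d.modify (pvSevA f) 0 (· + 1) else d := rfl

-- A-side: the count loop counts occurrences of each present key
lemma pvGetD_foldA : ∀ (L : List (List (String × String))) (d : PySem.Dict String Int) (k : String),
    d.contains k = true →
    (L.foldl pvStepA d).getD k 0 = d.getD k 0 + (L.countP (fun f => pvSevA f == k) : Int) := by
  intro L
  induction L with
  | nil => intro d k _; simp
  | cons f L ih =>
    intro d k hk
    show (L.foldl pvStepA (pvStepA d f)).getD k 0 = _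
    rw [pvStepA_eq]
    split_ifs with hc
    · rw [ih _ k (by
        rw [PySem.Dict.contains_modify]
        by_cases hx : k = pvSevA f
        · simp [hx]
        · simp [hk])]
      rw [PySem.Dict.getD_modify]
      rw [List.countP_cons]
      by_cases he : pvSevA f = k
      · simp only [he, beq_self_eq_true, if_pos]
        push_cast; ring
      · rw [if_neg (fun h => he h.symm)]
        simp only [beq_iff_eq, if_neg he]
        push_cast; ring
    · rw [ih _ k hk]
      have hne : pvSevA f ≠ k := fun h => hc (h ▸ hk)
      rw [List.countP_cons]
      simp only [beq_iff_eq, if_neg hne]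
      push_cast; ring

lemma pvCount_pos_iff (L : List (List (String × String))) (k : String) :
    (0 : Int) < (L.countP (fun f => pvSevA f == k) : Int) ↔ ∃ f ∈ L, pvSevA f = k := by
  rw [Int.natCast_pos, List.countP_pos_iff]
  simp

-- ===== VERDICT (by name: the statement is the Claim_ definition above) =====
theorem determine_severity_level_py_spec : Claim_equal_determine_severity_level_py := by
  unfold Claim_equal_determine_severity_level_py
  intro s v c _
  unfold Spec_determine_severity_level_py
  unfold determine_severity_level_py determine_severity_level_py_alt
  simp only [← List.foldl_append]
  set all := s ++ v ++ c with hall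
  have hcnt : ∀ k : String,
      (PySem.Dict.ofList [("critical", (0:Int)), ("high", 0), ("medium", 0), ("low", 0), ("info", 0)]).contains k = true →
      (PySem.Dict.ofList [("critical", (0:Int)), ("high", 0), ("medium", 0), ("low", 0), ("info", 0)]).getD k 0 = 0 →
      (all.foldl pvStepA (PySem.Dict.ofList [("critical", 0), ("high", 0), ("medium", 0), ("low", 0), ("info", 0)])).getD k 0 = (all.countP (fun f => pvSevA f == k) : Int) := by
    intro k hk h0
    rw [pvGetD_foldA all _ k hk, h0, zero_add]
  set M := all.foldl pvStepB 4 with hM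
  have hMle := pvFoldB_le all 4
  by_cases hcrit : ∃ f ∈ all, pvSevA f = "critical"
  · obtain ⟨f, hf, he⟩ := hcrit
    have hA : (0:Int) < all.countP (fun f => pvSevA f == "critical") :=
      (pvCount_pos_iff all _).mpr ⟨f, hf, he⟩
    rw [hcnt "critical" (by decide) (by decide)]
    rw [if_pos hA]
    have hM0 : M ≤ 0 := (pvFoldB_le_iff 0 all).mpr (Or.inr ⟨f, hf, by rw [pvRank_eq, if_pos he]⟩)
    have : M = 0 := by omega
    rw [this]
    decide
  · have hAc : ¬ (0:Int) < all.countP (fun f => pvSevA f == "critical") := by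
      rw [pvCount_pos_iff]; exact hcrit
    rw [hcnt "critical" (by decide) (by decide), if_neg hAc]
    have hM0 : ¬ M ≤ 0 := by
      intro h
      rcases (pvFoldB_le_iff 0 all).mp h with h | ⟨f, hf, hr⟩
      · omega
      · rw [pvRank_eq] at hr
        split_ifs at hr with h1 <;> try omega
        exact hcrit ⟨f, hf, h1⟩
    by_cases hhigh : ∃ f ∈ all, pvSevA f = "high"
    · obtain ⟨f, hf, he⟩ := hhigh
      have hA : (0:Int) < all.countP (fun f => pvSevA f == "high") :=
        (pvCount_pos_iff all _).mpr ⟨f, hf, he⟩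
      rw [hcnt "high" (by decide) (by decide), if_pos hA]
      have hM1 : M ≤ 1 := (pvFoldB_le_iff 1 all).mpr (Or.inr ⟨f, hf, by
        rw [pvRank_eq]; split_ifs with h1 <;> omega⟩)
      have : M = 1 := by omega
      rw [this]
      decide
    · have hAh : ¬ (0:Int) < all.countP (fun f => pvSevA f == "high") := by
        rw [pvCount_pos_iff]; exact hhigh
      rw [hcnt "high" (by decide) (by decide), if_neg hAh]
      have hM1 : ¬ M ≤ 1 := by
        intro h
        rcases (pvFoldB_le_iff 1 all).mp h with h | ⟨f, hf, hr⟩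
        · omega
        · rw [pvRank_eq] at hr
          split_ifs at hr with h1 h2 <;> try omega
          · exact hcrit ⟨f, hf, h1⟩
          · exact hhigh ⟨f, hf, h2⟩
      by_cases hmed : ∃ f ∈ all, pvSevA f = "medium"
      · obtain ⟨f, hf, he⟩ := hmed
        have hA : (0:Int) < all.countP (fun f => pvSevA f == "medium") :=
          (pvCount_pos_iff all _).mpr ⟨f, hf, he⟩
        rw [hcnt "medium" (by decide) (by decide), if_pos hA]
        have hM2 : M ≤ 2 := (pvFoldB_le_iff 2 all).mpr (Or.inr ⟨f, hf, by
          rw [pvRank_eq]; split_ifs with h1 h2 <;> omega⟩)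
        have : M = 2 := by omega
        rw [this]
        decide
      · have hAm : ¬ (0:Int) < all.countP (fun f => pvSevA f == "medium") := by
          rw [pvCount_pos_iff]; exact hmed
        rw [hcnt "medium" (by decide) (by decide), if_neg hAm]
        have hM2 : ¬ M ≤ 2 := by
          intro h
          rcases (pvFoldB_le_iff 2 all).mp h with h | ⟨f, hf, hr⟩
          · omega
          · rw [pvRank_eq] at hr
            split_ifs at hr with h1 h2 h3 <;> try omega
            · exact hcrit ⟨f, hf, h1⟩
            · exact hhigh ⟨f, hf, h2⟩
            · exact hmed ⟨f, hf, h3⟩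
        by_cases hlow : ∃ f ∈ all, pvSevA f = "low"
        · obtain ⟨f, hf, he⟩ := hlow
          have hA : (0:Int) < all.countP (fun f => pvSevA f == "low") :=
            (pvCount_pos_iff all _).mpr ⟨f, hf, he⟩
          rw [hcnt "low" (by decide) (by decide), if_pos hA]
          have hM3 : M ≤ 3 := (pvFoldB_le_iff 3 all).mpr (Or.inr ⟨f, hf, by
            rw [pvRank_eq]; split_ifs with h1 h2 h3 <;> omega⟩)
          have : M = 3 := by omega
          rw [this]
          decide
        · have hAl : ¬ (0:Int) < all.countP (fun f => pvSevA f == "low") := by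
            rw [pvCount_pos_iff]; exact hlow
          rw [hcnt "low" (by decide) (by decide), if_neg hAl]
          have hM3 : ¬ M ≤ 3 := by
            intro h
            rcases (pvFoldB_le_iff 3 all).mp h with h | ⟨f, hf, hr⟩
            · omega
            · rw [pvRank_eq] at hr
              split_ifs at hr with h1 h2 h3 h4 <;> try omega
              · exact hcrit ⟨f, hf, h1⟩
              · exact hhigh ⟨f, hf, h2⟩
              · exact hmed ⟨f, hf, h3⟩
              · exact hlow ⟨f, hf, h4⟩
          have : ¬ M < 4 := by omega
          rw [if_neg this]
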